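-- pv_equiv track=rewrite | github.com/zulker01/cryptography | cryptography/lab3/lab4_roll11.py | shiftColumn
-- ===== SOURCE A (Python) =====
-- from collections import deque
--
-- def rotateWord(word, cnt):
--     items = deque(word)
--     items.rotate(cnt)
--
--     return list(items)
--
-- def shiftColumn(matrix):
--
--     for i in range(4):  # for every row of the matrix:
--         tmplist = []
--         for j in range(4):  # list every element of the row
--             tmplist.append(matrix[j][i])
--         tmplist = rotateWord(tmplist, -1 * i) # rotate the row for row num
--
--         # update the matrix
--         for j in range(4):
--             matrix[j][i] = tmplist[j]
--
--     return matrix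
-- ===== SOURCE B (Python) =====
-- def shiftColumn(matrix):
--     # snapshot the 4x4 block, then write each entry directly:
--     # left-rotating column i by i means matrix[j][i] becomes snap[(j+i)%4][i]
--     snap = [row[:4] for row in matrix[:4]]
--     for j in range(4):
--         for i in range(4):
--             matrix[j][i] = snap[(j + i) % 4][i]
--     return matrix
-- ===== Notes on version B (the rewrite author's own statement) =====
-- stated objective: simpler
-- what changed: Replaces the per-column extract / deque-rotate / write-back (with the rotateWord helper and temp list) by one snapshot of the 4x4 block and a direct modular-index assignment matrix[j][i] = snap[(j+i)%4][i].
import Mathlib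
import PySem

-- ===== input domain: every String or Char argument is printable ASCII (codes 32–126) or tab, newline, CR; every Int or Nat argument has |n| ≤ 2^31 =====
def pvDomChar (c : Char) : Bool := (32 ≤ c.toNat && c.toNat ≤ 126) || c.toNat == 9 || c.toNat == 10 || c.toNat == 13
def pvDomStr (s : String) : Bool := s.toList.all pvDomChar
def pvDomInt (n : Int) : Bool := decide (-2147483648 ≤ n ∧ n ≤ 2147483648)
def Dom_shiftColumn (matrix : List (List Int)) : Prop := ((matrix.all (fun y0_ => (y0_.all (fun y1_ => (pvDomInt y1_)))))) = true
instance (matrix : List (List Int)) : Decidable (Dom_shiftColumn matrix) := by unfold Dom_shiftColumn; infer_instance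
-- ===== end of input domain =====

-- B replaces A's per-column extract / deque-rotate / write-back by one snapshot and direct
-- modular-index assignment (simpler). Python A and B both mutate `matrix` in place in the same
-- way and return it; the theorems here are about the returned value.

-- ===== PORT A =====
-- deque(word); items.rotate(cnt); list(items)  — result[j] = word[(j - cnt) mod n]
def rotateWord (word : List Int) (cnt : Int) : List Int :=
  (List.range word.length).map
    (fun j => word.getD (((j : Int) - cnt).emod (word.length : Int)).toNat 0)

-- tmplist = [matrix[j][i] for j in range(4)]
def colA (m : List (List Int)) (i : Nat) : List Int :=
  (List.range 4).map (fun j => (m.getD j []).getD i 0)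

-- for j in range(4): matrix[j][i] = tmplist[j]
def writeColA (m : List (List Int)) (i : Nat) (t : List Int) : List (List Int) :=
  (List.range 4).foldl (fun acc j => acc.set j ((acc.getD j []).set i (t.getD j 0))) m

-- one iteration of A's outer `for i in range(4)` loop
def shiftStepA (acc : List (List Int)) (i : Nat) : List (List Int) :=
  writeColA acc i (rotateWord (colA acc i) (-1 * (i : Int)))

def shiftColumn (matrix : List (List Int)) : List (List Int) :=
  (List.range 4).foldl shiftStepA matrix

-- ===== PORT B =====
-- one iteration of B's outer `for j in range(4)` loop: row j rewritten from the snapshot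
def rowStepB (snap : List (List Int)) (acc : List (List Int)) (j : Nat) : List (List Int) :=
  acc.set j
    ((List.range 4).foldl
      (fun row i => row.set i ((snap.getD ((j + i) % 4) []).getD i 0))
      (acc.getD j []))

def shiftColumn_alt (matrix : List (List Int)) : List (List Int) :=
  (List.range 4).foldl (rowStepB ((matrix.take 4).map (fun r => r.take 4))) matrix

-- ===== PRECONDITION & SPEC =====
-- Python A raises IndexError unless the matrix has at least 4 rows whose first 4 rows each have
-- at least 4 entries; Pre_ admits exactly the inputs on which A returns.
def Pre_shiftColumn (matrix : List (List Int)) : Prop :=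
  4 ≤ matrix.length ∧ ((matrix.take 4).all (fun r => 4 ≤ r.length)) = true
instance (matrix : List (List Int)) : Decidable (Pre_shiftColumn matrix) := by
  unfold Pre_shiftColumn; infer_instance

def pvWitness_shiftColumn : List (List Int) :=
  [[1, 2, 3, 4], [5, 6, 7, 8], [9, 10, 11, 12], [13, 14, 15, 16]]

def Spec_shiftColumn (matrix : List (List Int)) (out : List (List Int)) : Prop := out = shiftColumn_alt matrix
instance (matrix : List (List Int)) (out : List (List Int)) : Decidable (Spec_shiftColumn matrix out) := by unfold Spec_shiftColumn; infer_instance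

-- ===== CLAIM (what is proved, stated in full; the proofs are below) =====
def Claim_equal_shiftColumn : Prop := ∀ (matrix : List (List Int)), Dom_shiftColumn matrix → Pre_shiftColumn matrix → Spec_shiftColumn matrix (shiftColumn matrix)

-- ===== LEMMAS AND PROOFS =====
theorem row_shape (r : List Int) (h : 4 ≤ r.length) :
    ∃ a b c d t, r = a :: b :: c :: d :: t := by
  rcases r with _ | ⟨a, _ | ⟨b, _ | ⟨c, _ | ⟨d, t⟩⟩⟩⟩ <;>
    first
      | exact ⟨a, b, c, d, t, rfl⟩
      | (simp only [List.length_nil, List.length_cons] at h; omega)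

theorem mat_shape (m : List (List Int)) (h : 4 ≤ m.length) :
    ∃ r0 r1 r2 r3 rest, m = r0 :: r1 :: r2 :: r3 :: rest := by
  rcases m with _ | ⟨r0, _ | ⟨r1, _ | ⟨r2, _ | ⟨r3, rest⟩⟩⟩⟩ <;>
    first
      | exact ⟨r0, r1, r2, r3, rest, rfl⟩
      | (simp only [List.length_nil, List.length_cons] at h; omega)

-- ===== VERDICT (by name: the statement is the Claim_ definition above) =====
theorem shiftColumn_spec : Claim_equal_shiftColumn := by
  intro m _ hpre
  obtain ⟨hlen, hrows⟩ := hpre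
  obtain ⟨r0, r1, r2, r3, rest, rfl⟩ := mat_shape m hlen
  simp only [List.take, List.all_cons, List.all_nil, Bool.and_true, Bool.and_eq_true,
    decide_eq_true_eq] at hrows
  obtain ⟨h0, h1, h2, h3⟩ := hrows
  obtain ⟨a0, b0, c0, d0, t0, rfl⟩ := row_shape r0 h0
  obtain ⟨a1, b1, c1, d1, t1, rfl⟩ := row_shape r1 h1
  obtain ⟨a2, b2, c2, d2, t2, rfl⟩ := row_shape r2 h2
  obtain ⟨a3, b3, c3, d3, t3, rfl⟩ := row_shape r3 h3
  show shiftColumn ((a0 :: b0 :: c0 :: d0 :: t0) :: (a1 :: b1 :: c1 :: d1 :: t1) ::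
      (a2 :: b2 :: c2 :: d2 :: t2) :: (a3 :: b3 :: c3 :: d3 :: t3) :: rest) = shiftColumn_alt ((a0 :: b0 :: c0 :: d0 :: t0) :: (a1 :: b1 :: c1 :: d1 :: t1) ::
      (a2 :: b2 :: c2 :: d2 :: t2) :: (a3 :: b3 :: c3 :: d3 :: t3) :: rest)
  have hA : shiftColumn ((a0 :: b0 :: c0 :: d0 :: t0) :: (a1 :: b1 :: c1 :: d1 :: t1) ::
      (a2 :: b2 :: c2 :: d2 :: t2) :: (a3 :: b3 :: c3 :: d3 :: t3) :: rest) =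
      shiftStepA (shiftStepA (shiftStepA (shiftStepA ((a0 :: b0 :: c0 :: d0 :: t0) :: (a1 :: b1 :: c1 :: d1 :: t1) ::
      (a2 :: b2 :: c2 :: d2 :: t2) :: (a3 :: b3 :: c3 :: d3 :: t3) :: rest) 0) 1) 2) 3 := rfl
  have s1 : shiftStepA ((a0 :: b0 :: c0 :: d0 :: t0) ::
      (a1 :: b1 :: c1 :: d1 :: t1) ::
      (a2 :: b2 :: c2 :: d2 :: t2) ::
      (a3 :: b3 :: c3 :: d3 :: t3) :: rest) 0 =
      ((a0 :: b0 :: c0 :: d0 :: t0) ::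
      (a1 :: b1 :: c1 :: d1 :: t1) ::
      (a2 :: b2 :: c2 :: d2 :: t2) ::
      (a3 :: b3 :: c3 :: d3 :: t3) :: rest) := by with_unfolding_all rfl
  have s2 : shiftStepA ((a0 :: b0 :: c0 :: d0 :: t0) ::
      (a1 :: b1 :: c1 :: d1 :: t1) ::
      (a2 :: b2 :: c2 :: d2 :: t2) ::
      (a3 :: b3 :: c3 :: d3 :: t3) :: rest) 1 =
      ((a0 :: b1 :: c0 :: d0 :: t0) ::
      (a1 :: b2 :: c1 :: d1 :: t1) ::
      (a2 :: b3 :: c2 :: d2 :: t2) ::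
      (a3 :: b0 :: c3 :: d3 :: t3) :: rest) := by with_unfolding_all rfl
  have s3 : shiftStepA ((a0 :: b1 :: c0 :: d0 :: t0) ::
      (a1 :: b2 :: c1 :: d1 :: t1) ::
      (a2 :: b3 :: c2 :: d2 :: t2) ::
      (a3 :: b0 :: c3 :: d3 :: t3) :: rest) 2 =
      ((a0 :: b1 :: c2 :: d0 :: t0) ::
      (a1 :: b2 :: c3 :: d1 :: t1) ::
      (a2 :: b3 :: c0 :: d2 :: t2) ::
      (a3 :: b0 :: c1 :: d3 :: t3) :: rest) := by with_unfolding_all rfl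
  have s4 : shiftStepA ((a0 :: b1 :: c2 :: d0 :: t0) ::
      (a1 :: b2 :: c3 :: d1 :: t1) ::
      (a2 :: b3 :: c0 :: d2 :: t2) ::
      (a3 :: b0 :: c1 :: d3 :: t3) :: rest) 3 =
      ((a0 :: b1 :: c2 :: d3 :: t0) ::
      (a1 :: b2 :: c3 :: d0 :: t1) ::
      (a2 :: b3 :: c0 :: d1 :: t2) ::
      (a3 :: b0 :: c1 :: d2 :: t3) :: rest) := by with_unfolding_all rfl
  have hB : shiftColumn_alt ((a0 :: b0 :: c0 :: d0 :: t0) :: (a1 :: b1 :: c1 :: d1 :: t1) ::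
      (a2 :: b2 :: c2 :: d2 :: t2) :: (a3 :: b3 :: c3 :: d3 :: t3) :: rest) =
      rowStepB [[a0,b0,c0,d0],[a1,b1,c1,d1],[a2,b2,c2,d2],[a3,b3,c3,d3]] (rowStepB [[a0,b0,c0,d0],[a1,b1,c1,d1],[a2,b2,c2,d2],[a3,b3,c3,d3]] (rowStepB [[a0,b0,c0,d0],[a1,b1,c1,d1],[a2,b2,c2,d2],[a3,b3,c3,d3]] (rowStepB [[a0,b0,c0,d0],[a1,b1,c1,d1],[a2,b2,c2,d2],[a3,b3,c3,d3]] ((a0 :: b0 :: c0 :: d0 :: t0) :: (a1 :: b1 :: c1 :: d1 :: t1) ::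
      (a2 :: b2 :: c2 :: d2 :: t2) :: (a3 :: b3 :: c3 :: d3 :: t3) :: rest) 0) 1) 2) 3 := by
    with_unfolding_all rfl
  have u1 : rowStepB [[a0,b0,c0,d0],[a1,b1,c1,d1],[a2,b2,c2,d2],[a3,b3,c3,d3]] ((a0 :: b0 :: c0 :: d0 :: t0) ::
      (a1 :: b1 :: c1 :: d1 :: t1) ::
      (a2 :: b2 :: c2 :: d2 :: t2) ::
      (a3 :: b3 :: c3 :: d3 :: t3) :: rest) 0 =
      ((a0 :: b1 :: c2 :: d3 :: t0) ::
      (a1 :: b1 :: c1 :: d1 :: t1) ::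
      (a2 :: b2 :: c2 :: d2 :: t2) ::
      (a3 :: b3 :: c3 :: d3 :: t3) :: rest) := by with_unfolding_all rfl
  have u2 : rowStepB [[a0,b0,c0,d0],[a1,b1,c1,d1],[a2,b2,c2,d2],[a3,b3,c3,d3]] ((a0 :: b1 :: c2 :: d3 :: t0) ::
      (a1 :: b1 :: c1 :: d1 :: t1) ::
      (a2 :: b2 :: c2 :: d2 :: t2) ::
      (a3 :: b3 :: c3 :: d3 :: t3) :: rest) 1 =
      ((a0 :: b1 :: c2 :: d3 :: t0) ::
      (a1 :: b2 :: c3 :: d0 :: t1) ::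
      (a2 :: b2 :: c2 :: d2 :: t2) ::
      (a3 :: b3 :: c3 :: d3 :: t3) :: rest) := by with_unfolding_all rfl
  have u3 : rowStepB [[a0,b0,c0,d0],[a1,b1,c1,d1],[a2,b2,c2,d2],[a3,b3,c3,d3]] ((a0 :: b1 :: c2 :: d3 :: t0) ::
      (a1 :: b2 :: c3 :: d0 :: t1) ::
      (a2 :: b2 :: c2 :: d2 :: t2) ::
      (a3 :: b3 :: c3 :: d3 :: t3) :: rest) 2 =
      ((a0 :: b1 :: c2 :: d3 :: t0) ::
      (a1 :: b2 :: c3 :: d0 :: t1) ::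
      (a2 :: b3 :: c0 :: d1 :: t2) ::
      (a3 :: b3 :: c3 :: d3 :: t3) :: rest) := by with_unfolding_all rfl
  have u4 : rowStepB [[a0,b0,c0,d0],[a1,b1,c1,d1],[a2,b2,c2,d2],[a3,b3,c3,d3]] ((a0 :: b1 :: c2 :: d3 :: t0) ::
      (a1 :: b2 :: c3 :: d0 :: t1) ::
      (a2 :: b3 :: c0 :: d1 :: t2) ::
      (a3 :: b3 :: c3 :: d3 :: t3) :: rest) 3 =
      ((a0 :: b1 :: c2 :: d3 :: t0) ::
      (a1 :: b2 :: c3 :: d0 :: t1) ::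
      (a2 :: b3 :: c0 :: d1 :: t2) ::
      (a3 :: b0 :: c1 :: d2 :: t3) :: rest) := by with_unfolding_all rfl
  rw [hA, s1, s2, s3, s4, hB, u1, u2, u3, u4]
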